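-- pv_equiv track=rewrite | github.com/sange1104/financial-doc-review | app/ui.py | _get_review_reasons_kr
-- ===== SOURCE A (Python) =====
-- REVIEW_REASONS = {
--     "name field not found": "👤 이름을 찾을 수 없습니다",
--     "name confidence too low": "👤 이름 인식 신뢰도가 낮습니다",
--     "id_number field not found": "🔢 주민등록번호를 찾을 수 없습니다",
--     "id_number format invalid": "🔢 주민등록번호 형식이 올바르지 않습니다",
--     "id_number confidence too low": "🔢 주민등록번호 인식 신뢰도가 낮습니다",
--     "account_number field not found": "💳 계좌번호를 찾을 수 없습니다",
--     "account_number confidence too low": "💳 계좌번호 인식 신뢰도가 낮습니다",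
--     "bank_name field not found": "🏦 은행명을 찾을 수 없습니다",
--     "bank_name confidence too low": "🏦 은행명 인식 신뢰도가 낮습니다",
--     "glare detected on document": "💡 문서에서 빛반사가 감지되었습니다",
--     "image too blurry": "📷 이미지가 흐릿합니다",
--     "image resolution too low": "📐 이미지 해상도가 낮습니다",
--     "VLM could not determine document type": "❓ 문서 유형을 판별할 수 없습니다",
--     "VLM detected bank account": "⚠️ VLM이 통장사본으로 판별했습니다",
--     "VLM detected ID card": "⚠️ VLM이 신분증으로 판별했습니다",
--     "address confidence too low": "🏠 주소 인식 신뢰도가 낮습니다",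
--     "issue_date confidence too low": "📅 발급일 인식 신뢰도가 낮습니다",
--     "id_number low confidence chars": "🔢 주민등록번호 일부 글자 인식 신뢰도가 낮습니다",
--     "account_number low confidence chars": "💳 계좌번호 일부 글자 인식 신뢰도가 낮습니다",
--     "name low confidence chars": "👤 이름 일부 글자 인식 신뢰도가 낮습니다",
--     "bank_name low confidence chars": "🏦 은행명 일부 글자 인식 신뢰도가 낮습니다",
--     "address low confidence chars": "🏠 주소 일부 글자 인식 신뢰도가 낮습니다",
--     "issue_date low confidence chars": "📅 발급일 일부 글자 인식 신뢰도가 낮습니다",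
-- }
--
-- def _get_review_reasons_kr(reason: str) -> list[str]:
--     """review 사유 영문 → 한글 리스트 반환."""
--     parts = [r.strip() for r in reason.split(";")]
--     # 긴 키부터 매칭하여 부분 문자열 오매칭 방지 (e.g. "name" vs "bank_name")
--     sorted_keys = sorted(REVIEW_REASONS.keys(), key=len, reverse=True)
--     result = []
--     for part in parts:
--         matched = False
--         for key in sorted_keys:
--             if key.lower() in part.lower():
--                 result.append(REVIEW_REASONS[key])
--                 matched = True
--                 break
--         if not matched:
--             result.append(part)
--     return result
-- ===== SOURCE B (Python) =====
-- REVIEW_REASONS = {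
--     "name field not found": "👤 이름을 찾을 수 없습니다",
--     "name confidence too low": "👤 이름 인식 신뢰도가 낮습니다",
--     "id_number field not found": "🔢 주민등록번호를 찾을 수 없습니다",
--     "id_number format invalid": "🔢 주민등록번호 형식이 올바르지 않습니다",
--     "id_number confidence too low": "🔢 주민등록번호 인식 신뢰도가 낮습니다",
--     "account_number field not found": "💳 계좌번호를 찾을 수 없습니다",
--     "account_number confidence too low": "💳 계좌번호 인식 신뢰도가 낮습니다",
--     "bank_name field not found": "🏦 은행명을 찾을 수 없습니다",
--     "bank_name confidence too low": "🏦 은행명 인식 신뢰도가 낮습니다",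
--     "glare detected on document": "💡 문서에서 빛반사가 감지되었습니다",
--     "image too blurry": "📷 이미지가 흐릿합니다",
--     "image resolution too low": "📐 이미지 해상도가 낮습니다",
--     "VLM could not determine document type": "❓ 문서 유형을 판별할 수 없습니다",
--     "VLM detected bank account": "⚠️ VLM이 통장사본으로 판별했습니다",
--     "VLM detected ID card": "⚠️ VLM이 신분증으로 판별했습니다",
--     "address confidence too low": "🏠 주소 인식 신뢰도가 낮습니다",
--     "issue_date confidence too low": "📅 발급일 인식 신뢰도가 낮습니다",
--     "id_number low confidence chars": "🔢 주민등록번호 일부 글자 인식 신뢰도가 낮습니다",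
--     "account_number low confidence chars": "💳 계좌번호 일부 글자 인식 신뢰도가 낮습니다",
--     "name low confidence chars": "👤 이름 일부 글자 인식 신뢰도가 낮습니다",
--     "bank_name low confidence chars": "🏦 은행명 일부 글자 인식 신뢰도가 낮습니다",
--     "address low confidence chars": "🏠 주소 일부 글자 인식 신뢰도가 낮습니다",
--     "issue_date low confidence chars": "📅 발급일 일부 글자 인식 신뢰도가 낮습니다",
-- }
--
--
-- def _get_review_reasons_kr(reason: str) -> list[str]:
--     """review 사유 영문 → 한글 리스트 반환 (no sorting: collect all matches, take the longest)."""
--     result = []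
--     for part in [r.strip() for r in reason.split(";")]:
--         part_l = part.lower()
--         candidates = [k for k in REVIEW_REASONS if k.lower() in part_l]
--         if candidates:
--             result.append(REVIEW_REASONS[max(candidates, key=len)])
--         else:
--             result.append(part)
--     return result
-- ===== Notes on version B (the rewrite author's own statement) =====
-- stated objective: simpler
-- what changed: Per part, B drops A's length-descending pre-sort and the matched/break flag: it collects all dict keys whose lowercased form is a substring of the lowercased part and picks the longest with max(key=len) (Python max returns the first maximal element, matching A's stable reverse sort tie-break). B avoids re-sorting the key list on every call, a constant-factor saving.
import Mathlib
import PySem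

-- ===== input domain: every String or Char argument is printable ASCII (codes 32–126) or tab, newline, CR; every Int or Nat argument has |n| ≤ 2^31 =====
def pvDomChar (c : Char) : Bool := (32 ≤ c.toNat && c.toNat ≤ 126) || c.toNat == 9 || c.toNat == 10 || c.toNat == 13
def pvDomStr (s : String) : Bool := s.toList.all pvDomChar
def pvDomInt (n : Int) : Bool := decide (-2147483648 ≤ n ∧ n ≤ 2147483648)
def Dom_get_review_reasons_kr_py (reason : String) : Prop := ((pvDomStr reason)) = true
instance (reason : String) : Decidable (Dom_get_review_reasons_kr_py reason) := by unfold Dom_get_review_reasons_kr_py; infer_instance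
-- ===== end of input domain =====

-- B drops A's length-descending sort and matched/break flag: per part it collects all matching
-- keys and takes the longest with max(, key=len) (objective: simpler).

-- the module constant REVIEW_REASONS, a dict in insertion order
def pvReviewReasons : PySem.Dict String String := PySem.Dict.ofList [
  ("name field not found", "👤 이름을 찾을 수 없습니다"),
  ("name confidence too low", "👤 이름 인식 신뢰도가 낮습니다"),
  ("id_number field not found", "🔢 주민등록번호를 찾을 수 없습니다"),
  ("id_number format invalid", "🔢 주민등록번호 형식이 올바르지 않습니다"),
  ("id_number confidence too low", "🔢 주민등록번호 인식 신뢰도가 낮습니다"),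
  ("account_number field not found", "💳 계좌번호를 찾을 수 없습니다"),
  ("account_number confidence too low", "💳 계좌번호 인식 신뢰도가 낮습니다"),
  ("bank_name field not found", "🏦 은행명을 찾을 수 없습니다"),
  ("bank_name confidence too low", "🏦 은행명 인식 신뢰도가 낮습니다"),
  ("glare detected on document", "💡 문서에서 빛반사가 감지되었습니다"),
  ("image too blurry", "📷 이미지가 흐릿합니다"),
  ("image resolution too low", "📐 이미지 해상도가 낮습니다"),
  ("VLM could not determine document type", "❓ 문서 유형을 판별할 수 없습니다"),
  ("VLM detected bank account", "⚠️ VLM이 통장사본으로 판별했습니다"),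
  ("VLM detected ID card", "⚠️ VLM이 신분증으로 판별했습니다"),
  ("address confidence too low", "🏠 주소 인식 신뢰도가 낮습니다"),
  ("issue_date confidence too low", "📅 발급일 인식 신뢰도가 낮습니다"),
  ("id_number low confidence chars", "🔢 주민등록번호 일부 글자 인식 신뢰도가 낮습니다"),
  ("account_number low confidence chars", "💳 계좌번호 일부 글자 인식 신뢰도가 낮습니다"),
  ("name low confidence chars", "👤 이름 일부 글자 인식 신뢰도가 낮습니다"),
  ("bank_name low confidence chars", "🏦 은행명 일부 글자 인식 신뢰도가 낮습니다"),
  ("address low confidence chars", "🏠 주소 일부 글자 인식 신뢰도가 낮습니다"),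
  ("issue_date low confidence chars", "📅 발급일 일부 글자 인식 신뢰도가 낮습니다")]

-- ===== PORT A =====
-- A's inner 'for key in sorted_keys: if key.lower() in part.lower(): append(REVIEW_REASONS[key]); break'
-- (the key comes from the dict itself, so REVIEW_REASONS[key] always succeeds: get? is some here)
def pvLoopA (ks : List String) (part : String) : Option String :=
  match ks with
  | [] => none
  | k :: rest =>
    if PySem.Str.isIn (PySem.Str.lower k) (PySem.Str.lower part)
    then PySem.Dict.get? pvReviewReasons k
    else pvLoopA rest part

def get_review_reasons_kr_py (reason : String) : List String :=
  let parts := ((PySem.Str.split? reason ";").getD []).map (fun r => PySem.Str.strip r)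
  let sortedKeys := PySem.List.sorted (PySem.Dict.keys pvReviewReasons) (fun k => PySem.Str.len k) true
  parts.foldl (fun result part =>
    result ++ [match pvLoopA sortedKeys part with
               | some v => v        -- matched = True, translated value appended
               | none => part]) []  -- not matched: the part itself

-- ===== PORT B =====
def get_review_reasons_kr_py_alt (reason : String) : List String :=
  let parts := ((PySem.Str.split? reason ";").getD []).map (fun r => PySem.Str.strip r)
  parts.foldl (fun result part =>
    let partL := PySem.Str.lower part
    let candidates := (PySem.Dict.keys pvReviewReasons).filter
      (fun k => PySem.Str.isIn (PySem.Str.lower k) partL)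
    result ++ [match PySem.List.max? candidates (fun k => PySem.Str.len k) with
               | some k => (PySem.Dict.get? pvReviewReasons k).getD part  -- k is a dict key: get? is some
               | none => part]) []

-- ===== PRECONDITION & SPEC =====
def Spec_get_review_reasons_kr_py (reason : String) (out : List String) : Prop := out = get_review_reasons_kr_py_alt reason
instance (reason : String) (out : List String) : Decidable (Spec_get_review_reasons_kr_py reason out) := by unfold Spec_get_review_reasons_kr_py; infer_instance

-- ===== CLAIM (what is proved, stated in full; the proofs are below) =====
def Claim_equal_get_review_reasons_kr_py : Prop := ∀ (reason : String), Dom_get_review_reasons_kr_py reason → Spec_get_review_reasons_kr_py reason (get_review_reasons_kr_py reason)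

-- ===== LEMMAS AND PROOFS =====

-- inserting x into a list sorted descending by key moves the first match exactly like
-- one step of the running first-strict-max fold (the body of PySem.List.max?)
theorem pv_find?_insertBy_rev {α : Type} (key : α → Int) (p : α → Bool) (x : α) :
    ∀ (s : List α), s.Pairwise (fun a b => key b ≤ key a) →
    (PySem.List.insertBy (fun a b => decide (key b < key a)) x s).find? p
      = if p x then
          (match s.find? p with
           | none => some x
           | some m => if key m < key x then some x else some m)
        else s.find? p := by
  intro s
  induction s with
  | nil =>
    intro _
    simp [PySem.List.insertBy, List.find?]
  | cons y t ih =>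
    intro hp
    rw [List.pairwise_cons] at hp
    by_cases hxy : key y < key x
    · -- x goes in front of y
      have hins : PySem.List.insertBy (fun a b => decide (key b < key a)) x (y :: t)
          = x :: y :: t := by simp [PySem.List.insertBy, hxy]
      rw [hins]
      by_cases hpx : p x
      · rw [List.find?_cons_of_pos hpx, hpx]
        simp only [if_true]
        cases hfind : (y :: t).find? p with
        | none => rfl
        | some m =>
          have hm : m ∈ y :: t := List.mem_of_find?_eq_some hfind
          have hle : key m ≤ key y := by
            rcases List.mem_cons.mp hm with h | h
            · exact le_of_eq (by rw [h])
            · exact hp.1 m h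
          have : key m < key x := lt_of_le_of_lt hle hxy
          simp [this]
      · rw [List.find?_cons_of_neg (by simp [hpx])]
        simp [hpx]
    · -- x goes behind y
      have hins : PySem.List.insertBy (fun a b => decide (key b < key a)) x (y :: t)
          = y :: PySem.List.insertBy (fun a b => decide (key b < key a)) x t := by
        simp [PySem.List.insertBy, hxy]
      rw [hins]
      by_cases hpy : p y
      · rw [List.find?_cons_of_pos hpy, List.find?_cons_of_pos hpy]
        have : ¬ key y < key x := hxy
        by_cases hpx : p x <;> simp [hpx, this]
      · rw [List.find?_cons_of_neg (by simp [hpy]), List.find?_cons_of_neg (by simp [hpy])]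
        exact ih hp.2

-- first match over the stable length-descending sort = running first-strict-max over the matches
theorem pv_find?_foldl_insertBy {α : Type} (key : α → Int) (p : α → Bool) :
    ∀ (L : List α),
    (L.foldl (fun acc x => PySem.List.insertBy (fun a b => decide (key b < key a)) x acc) []).find? p
      = L.foldl (fun acc x =>
          if p x then
            (match acc with
             | none => some x
             | some m => if key m < key x then some x else some m)
          else acc) none := by
  intro L
  induction L using List.reverseRecOn with
  | nil => rfl
  | append_singleton L x ih =>
    rw [List.foldl_append, List.foldl_append]
    simp only [List.foldl_cons, List.foldl_nil]
    have hp : (L.foldl (fun acc x => PySem.List.insertBy (fun a b => decide (key b < key a)) x acc) []).Pairwise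
        (fun a b => key b ≤ key a) := by
      have := PySem.List.sorted_pairwise_rev L key
      rwa [PySem.List.sorted_rev_eq_foldl_insertBy] at this
    rw [pv_find?_insertBy_rev key p x _ hp, ih]

theorem pv_find?_sorted_rev_eq_max?_filter {α : Type} (key : α → Int) (p : α → Bool) (L : List α) :
    (PySem.List.sorted L key true).find? p = PySem.List.max? (L.filter p) key := by
  rw [PySem.List.sorted_rev_eq_foldl_insertBy, pv_find?_foldl_insertBy]
  exact PySem.List.foldl_if_eq_foldl_filter p
    (fun acc x => match acc with
                  | none => some x
                  | some m => if key m < key x then some x else some m) L none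

-- A's break-loop is find? over the keys, followed by the dict lookup
theorem pvLoopA_eq_find? (ks : List String) (part : String) :
    pvLoopA ks part
      = match ks.find? (fun k => PySem.Str.isIn (PySem.Str.lower k) (PySem.Str.lower part)) with
        | some k => PySem.Dict.get? pvReviewReasons k
        | none => none := by
  induction ks with
  | nil => rfl
  | cons k rest ih =>
    by_cases h : PySem.Str.isIn (PySem.Str.lower k) (PySem.Str.lower part)
    · rw [List.find?_cons_of_pos (p := fun k => PySem.Str.isIn (PySem.Str.lower k) (PySem.Str.lower part)) h]
      simp only [pvLoopA, if_pos h]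
    · rw [List.find?_cons_of_neg (p := fun k => PySem.Str.isIn (PySem.Str.lower k) (PySem.Str.lower part)) h]
      simp only [pvLoopA, if_neg h]
      exact ih

-- the two per-part selections agree
theorem pv_part_eq (part : String) :
    (match pvLoopA (PySem.List.sorted (PySem.Dict.keys pvReviewReasons) (fun k => PySem.Str.len k) true) part with
     | some v => v
     | none => part)
      = (match PySem.List.max?
            ((PySem.Dict.keys pvReviewReasons).filter
              (fun k => PySem.Str.isIn (PySem.Str.lower k) (PySem.Str.lower part)))
            (fun k => PySem.Str.len k) with
         | some k => (PySem.Dict.get? pvReviewReasons k).getD part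
         | none => part) := by
  rw [pvLoopA_eq_find?,
    pv_find?_sorted_rev_eq_max?_filter (fun k => PySem.Str.len k)
      (fun k => PySem.Str.isIn (PySem.Str.lower k) (PySem.Str.lower part))
      (PySem.Dict.keys pvReviewReasons)]
  cases hmax : PySem.List.max?
      ((PySem.Dict.keys pvReviewReasons).filter
        (fun k => PySem.Str.isIn (PySem.Str.lower k) (PySem.Str.lower part)))
      (fun k => PySem.Str.len k) with
  | none => rfl
  | some k =>
    -- k is a key of the dict, so the lookup succeeds
    have hk : k ∈ PySem.Dict.keys pvReviewReasons :=
      List.mem_of_mem_filter (PySem.List.max?_mem hmax)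
    have hsome : (PySem.Dict.get? pvReviewReasons k).isSome = true := by
      revert hk
      have : ∀ k ∈ PySem.Dict.keys pvReviewReasons,
          (PySem.Dict.get? pvReviewReasons k).isSome = true := by decide
      exact this k
    cases hv : PySem.Dict.get? pvReviewReasons k with
    | none => rw [hv] at hsome; cases hsome
    | some v => simp [hv]

-- ===== VERDICT (by name: the statement is the Claim_ definition above) =====
theorem get_review_reasons_kr_py_spec : Claim_equal_get_review_reasons_kr_py := by
  intro reason _
  unfold Spec_get_review_reasons_kr_py get_review_reasons_kr_py get_review_reasons_kr_py_alt
  simp only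
  rw [PySem.List.foldl_append_singleton_eq_map, PySem.List.foldl_append_singleton_eq_map]
  exact congrArg _ (List.map_congr_left (fun part _ => pv_part_eq part))
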